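-- pv_equiv track=rewrite | github.com/joshsmith2/odds_sods | path_checker/path_checker.py | lists_equal_to_length_of_shortest
-- ===== SOURCE A (Python) =====
-- import itertools
--
-- def lists_equal_to_length_of_shortest(list_a,list_b):
--     """
--     :param list_a, list_b:
--     :return: Boolean
--     """
--     stripped_a = [a for a in list_a if a != '']
--     stripped_b = [b for b in list_b if b != '']
--     zipped = itertools.izip(stripped_a, stripped_b)
--     equal = True
--     for z in zipped:
--         if z[0] != z[1]:
--             equal = False
--     return equal
-- ===== SOURCE B (Python) =====
-- def lists_equal_to_length_of_shortest(list_a, list_b):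
--     i = j = 0
--     while True:
--         while i < len(list_a) and list_a[i] == '':
--             i += 1
--         while j < len(list_b) and list_b[j] == '':
--             j += 1
--         if i == len(list_a) or j == len(list_b):
--             return True
--         if list_a[i] != list_b[j]:
--             return False
--         i += 1
--         j += 1
-- ===== Notes on version B (the rewrite author's own statement) =====
-- stated objective: faster
-- what changed: Replaces A's two filtering passes plus zip-and-mutable-flag loop by a single two-pointer scan over the original lists that skips empty strings in place, never materialises the filtered lists, and returns on the first mismatch.
import Mathlib
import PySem

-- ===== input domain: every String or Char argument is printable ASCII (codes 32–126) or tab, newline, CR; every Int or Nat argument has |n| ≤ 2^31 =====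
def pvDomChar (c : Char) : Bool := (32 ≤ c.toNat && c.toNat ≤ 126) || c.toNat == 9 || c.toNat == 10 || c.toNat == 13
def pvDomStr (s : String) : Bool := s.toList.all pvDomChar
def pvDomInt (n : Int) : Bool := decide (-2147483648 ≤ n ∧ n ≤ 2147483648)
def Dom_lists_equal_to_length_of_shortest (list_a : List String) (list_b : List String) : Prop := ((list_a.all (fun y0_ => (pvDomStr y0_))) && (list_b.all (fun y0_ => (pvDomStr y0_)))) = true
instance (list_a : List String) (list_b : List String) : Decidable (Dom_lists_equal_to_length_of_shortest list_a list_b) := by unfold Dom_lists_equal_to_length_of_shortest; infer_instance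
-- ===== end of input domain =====

-- B replaces A's filter-filter-zip-flag pipeline by a single two-pointer scan over the
-- original lists that skips '' in place and returns on the first mismatch (objective: alternative).
-- ===== PORT A =====
-- A: filter out '' from both lists, zip (izip truncates), then a flag loop
def lists_equal_to_length_of_shortest (list_a : List String) (list_b : List String) : Bool :=
  let stripped_a := list_a.filter (fun a => a != "")
  let stripped_b := list_b.filter (fun b => b != "")
  let zipped := List.zip stripped_a stripped_b
  let equal := zipped.foldl (fun equal z => if z.1 != z.2 then false else equal) true
  equal

-- ===== PORT B =====
-- inner `while list[i] == '': i += 1` loops: advance the pointer past empty strings;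
-- the pointer into a fixed list is represented by the remaining suffix
def pvSkipEmpty : List String → List String
  | [] => []
  | a :: rest => if a == "" then pvSkipEmpty rest else a :: rest

theorem pvSkipEmpty_length_le (l : List String) : (pvSkipEmpty l).length ≤ l.length := by
  induction l with
  | nil => simp [pvSkipEmpty]
  | cons a rest ih =>
      simp only [pvSkipEmpty]
      split
      · exact Nat.le_succ_of_le ih
      · simp

-- outer `while True` loop of B, state = the two suffixes at the pointers
def lists_equal_to_length_of_shortest_alt (list_a : List String) (list_b : List String) : Bool :=
  match ha : pvSkipEmpty list_a, hb : pvSkipEmpty list_b with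
  | [], _ => true
  | _, [] => true
  | a :: resta, b :: restb =>
      if a != b then false
      else lists_equal_to_length_of_shortest_alt resta restb
termination_by list_a.length + list_b.length
decreasing_by
  have h1 := pvSkipEmpty_length_le list_a
  have h2 := pvSkipEmpty_length_le list_b
  rw [ha] at h1; rw [hb] at h2
  simp at h1 h2
  omega

-- ===== PRECONDITION & SPEC =====
def Spec_lists_equal_to_length_of_shortest (list_a : List String) (list_b : List String) (out : Bool) : Prop := out = lists_equal_to_length_of_shortest_alt list_a list_b
instance (list_a : List String) (list_b : List String) (out : Bool) : Decidable (Spec_lists_equal_to_length_of_shortest list_a list_b out) := by unfold Spec_lists_equal_to_length_of_shortest; infer_instance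

-- ===== CLAIM =====
def Claim_equal_lists_equal_to_length_of_shortest : Prop := ∀ (list_a : List String) (list_b : List String), Dom_lists_equal_to_length_of_shortest list_a list_b → Spec_lists_equal_to_length_of_shortest list_a list_b (lists_equal_to_length_of_shortest list_a list_b)

-- ===== LEMMAS AND PROOFS =====
theorem pv_foldl_flag (ps : List (String × String)) (c : Bool) :
    ps.foldl (fun equal z => if z.1 != z.2 then false else equal) c
      = (c && ps.all (fun z => z.1 == z.2)) := by
  induction ps generalizing c with
  | nil => simp
  | cons p t ih =>
      simp only [List.foldl_cons, List.all_cons, ih]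
      cases h : p.1 == p.2 <;> simp [bne, h]

theorem pvSkipEmpty_filter (l : List String) :
    (pvSkipEmpty l).filter (fun a => a != "") = l.filter (fun a => a != "") := by
  induction l with
  | nil => rfl
  | cons a rest ih =>
      simp only [pvSkipEmpty]
      by_cases h : a = ""
      · simp [h, ih]
      · simp [h]

theorem pvSkipEmpty_head_ne (l : List String) (a : String) (rest : List String)
    (h : pvSkipEmpty l = a :: rest) : a ≠ "" := by
  induction l with
  | nil => simp [pvSkipEmpty] at h
  | cons x xs ih =>
      simp only [pvSkipEmpty] at h
      by_cases hx : x = ""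
      · simp [hx] at h; exact ih h
      · simp [hx] at h; rw [← h.1]; exact hx

theorem pv_alt_eq_all (list_a list_b : List String) :
    lists_equal_to_length_of_shortest_alt list_a list_b
      = ((list_a.filter (fun a => a != "")).zip (list_b.filter (fun b => b != ""))).all
          (fun z => z.1 == z.2) := by
  rw [lists_equal_to_length_of_shortest_alt]
  rw [← pvSkipEmpty_filter list_a, ← pvSkipEmpty_filter list_b]
  rcases ha : pvSkipEmpty list_a with _ | ⟨a, resta⟩
  · simp
  · rcases hb : pvSkipEmpty list_b with _ | ⟨b, restb⟩
    · simp
    · have hane : a ≠ "" := pvSkipEmpty_head_ne list_a a resta ha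
      have hbne : b ≠ "" := pvSkipEmpty_head_ne list_b b restb hb
      have h1 := pvSkipEmpty_length_le list_a
      have h2 := pvSkipEmpty_length_le list_b
      rw [ha] at h1; rw [hb] at h2
      simp only [List.length_cons] at h1 h2
      have ih := pv_alt_eq_all resta restb
      simp only [List.filter_cons, if_pos (by simp [hane] : (a != "") = true),
        if_pos (by simp [hbne] : (b != "") = true), List.zip_cons_cons, List.all_cons]
      by_cases hab : a = b
      · simp [hab, ih]
      · simp [hab, bne]
termination_by list_a.length + list_b.length
decreasing_by
  have g1 := pvSkipEmpty_length_le list_a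
  have g2 := pvSkipEmpty_length_le list_b
  rw [ha] at g1; rw [hb] at g2
  simp only [List.length_cons] at g1 g2
  omega

-- ===== VERDICT =====
theorem lists_equal_to_length_of_shortest_spec : Claim_equal_lists_equal_to_length_of_shortest := by
  intro la lb _
  unfold Spec_lists_equal_to_length_of_shortest lists_equal_to_length_of_shortest
  simp only [pv_foldl_flag, Bool.true_and, pv_alt_eq_all]
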